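-- pv_equiv track=rewrite | github.com/ajbenn90/CS4150-F23-Solutions | programming/a1/a1.py | countUniqueAnagrams
-- ===== SOURCE A (Python) =====
-- def countUniqueAnagrams(words):
--     # add anagrams to sets - one to store all anagrams and one for non-unique ones
--     fullSet = set()
--     nonUniqueSet = set()
--     for word in words:
--         # sorts the letters in a word
--         anagram = "".join(sorted(word))
--         if anagram in fullSet:
--             nonUniqueSet.add(anagram)
--         fullSet.add(anagram)
--
--     return len(fullSet) - len(nonUniqueSet)
-- ===== SOURCE B (Python) =====
-- def countUniqueAnagrams(words):
--     # sort all canonical keys, then scan runs of equal keys: count runs of length 1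
--     keys = sorted("".join(sorted(w)) for w in words)
--     n = len(keys)
--     total = 0
--     i = 0
--     while i < n:
--         j = i + 1
--         while j < n and keys[j] == keys[i]:
--             j += 1
--         if j == i + 1:
--             total += 1
--         i = j
--     return total
-- ===== Notes on version B (the rewrite author's own statement) =====
-- stated objective: alternative
-- what changed: Replaces A's hash-set bookkeeping (fullSet/nonUniqueSet with an in-loop membership branch) by a sort-then-scan algorithm: sort the list of canonical keys so equal keys become adjacent, then scan runs of equal keys and count the runs of length exactly 1; no sets or dicts at all.
import Mathlib
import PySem

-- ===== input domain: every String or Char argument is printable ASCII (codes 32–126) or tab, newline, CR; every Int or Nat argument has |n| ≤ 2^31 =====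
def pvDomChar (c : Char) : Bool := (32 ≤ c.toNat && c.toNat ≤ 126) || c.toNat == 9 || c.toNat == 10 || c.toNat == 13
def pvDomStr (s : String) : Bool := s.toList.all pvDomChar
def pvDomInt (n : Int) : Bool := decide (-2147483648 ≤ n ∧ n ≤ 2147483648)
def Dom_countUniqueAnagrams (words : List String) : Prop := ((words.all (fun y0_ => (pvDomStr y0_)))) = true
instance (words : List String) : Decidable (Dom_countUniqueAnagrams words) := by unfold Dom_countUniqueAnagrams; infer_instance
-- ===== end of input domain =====

-- B replaces A's two-set in-loop duplicate detection by a sort-then-scan algorithm: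
-- sort all canonical keys, then count the runs of equal adjacent keys having length 1
-- (objective: alternative algorithm, similar cost).

-- ===== PORT A =====
def countUniqueAnagrams (words : List String) : Int :=
  let st := words.foldl
    (fun (p : PySem.Set String × PySem.Set String) word =>
      let anagram := String.ofList (PySem.List.sorted word.toList (fun c => c) false)
      let nonUniqueSet := if PySem.Set.contains p.1 anagram
                          then PySem.Set.add p.2 anagram else p.2
      (PySem.Set.add p.1 anagram, nonUniqueSet))
    (PySem.Set.empty, PySem.Set.empty)
  (PySem.Set.len st.1 : Int) - (PySem.Set.len st.2 : Int)

-- ===== PORT B =====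
-- the inner `while j < n and keys[j] == keys[i]` loop: skip the rest of the current run
def pvSkipRun (x : String) : List String → List String
  | [] => []
  | y :: ys => if y = x then pvSkipRun x ys else y :: ys

lemma pvSkipRun_length_le (x : String) (ys : List String) :
    (pvSkipRun x ys).length ≤ ys.length := by
  induction ys with
  | nil => simp [pvSkipRun]
  | cons y ys ih => simp only [pvSkipRun]; split_ifs; · simp; omega
                    · simp

-- the outer `while i < n` loop: count the runs of length exactly 1
def pvCountRuns : List String → Int
  | [] => 0
  | x :: xs =>
    if xs.head? = some x then pvCountRuns (pvSkipRun x xs)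
    else 1 + pvCountRuns xs
termination_by s => s.length
decreasing_by
  · have := pvSkipRun_length_le x xs; simp; omega
  · simp

def countUniqueAnagrams_alt (words : List String) : Int :=
  let keys := PySem.List.sorted
    (words.map (fun w => String.ofList (PySem.List.sorted w.toList (fun c => c) false)))
    (fun k => k) false
  pvCountRuns keys

-- ===== PRECONDITION & SPEC =====
def Spec_countUniqueAnagrams (words : List String) (out : Int) : Prop := out = countUniqueAnagrams_alt words
instance (words : List String) (out : Int) : Decidable (Spec_countUniqueAnagrams words out) := by unfold Spec_countUniqueAnagrams; infer_instance

-- ===== CLAIM (what is proved, stated in full; the proofs are below) =====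
def Claim_equal_countUniqueAnagrams : Prop := ∀ (words : List String), Dom_countUniqueAnagrams words → Spec_countUniqueAnagrams words (countUniqueAnagrams words)

-- ===== LEMMAS AND PROOFS =====

-- one step of A's loop, on an already-canonical key
def pvStepA (p : PySem.Set String × PySem.Set String) (k : String) :
    PySem.Set String × PySem.Set String :=
  (PySem.Set.add p.1 k, if PySem.Set.contains p.1 k then PySem.Set.add p.2 k else p.2)

-- A's loop state after processing the key list ks: the first set is set(ks); the second
-- is Nodup and contains exactly the keys occurring at least twice in ks.
lemma pvA_state (ks : List String) :
    (ks.foldl pvStepA (PySem.Set.empty, PySem.Set.empty)).1 = PySem.Set.ofList ks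
    ∧ (ks.foldl pvStepA (PySem.Set.empty, PySem.Set.empty)).2.Nodup
    ∧ ∀ x, x ∈ (ks.foldl pvStepA (PySem.Set.empty, PySem.Set.empty)).2 ↔ 2 ≤ ks.count x := by
  induction ks using List.reverseRecOn with
  | nil => simp [PySem.Set.empty, PySem.Set.ofList]
  | append_singleton ks k ih =>
    obtain ⟨h1, h2, h3⟩ := ih
    rw [List.foldl_append, List.foldl_cons, List.foldl_nil]
    set st := ks.foldl pvStepA (PySem.Set.empty, PySem.Set.empty) with hst
    refine ⟨?_, ?_, ?_⟩
    · show (PySem.Set.add st.1 k) = _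
      rw [h1, PySem.Set.ofList_append_singleton]
    · by_cases hk : PySem.Set.contains st.1 k
      · show ((if PySem.Set.contains st.1 k then PySem.Set.add st.2 k else st.2)).Nodup
        rw [if_pos hk]
        exact PySem.Set.nodup_add _ _ h2
      · show ((if PySem.Set.contains st.1 k then PySem.Set.add st.2 k else st.2)).Nodup
        rwa [if_neg hk]
    · intro x
      show x ∈ (if PySem.Set.contains st.1 k then PySem.Set.add st.2 k else st.2) ↔ _
      by_cases hk : PySem.Set.contains st.1 k
      · have hkks : k ∈ ks := by
          have := (PySem.Set.contains_iff _ _).1 hk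
          rwa [h1, PySem.Set.mem_ofList] at this
        have hkpos : 0 < ks.count k := List.count_pos_iff.2 hkks
        rw [if_pos hk, PySem.Set.mem_add, h3, List.count_append]
        rcases eq_or_ne x k with rfl | hx
        · simp only [List.count_singleton, beq_self_eq_true, if_true, or_true, true_iff]
          omega
        · rw [List.count_singleton, if_neg (by simpa using fun h => hx h.symm), Nat.add_zero]
          constructor
          · rintro (h | h)
            · exact h
            · simp_all
          · exact Or.inl
      · have hkks : k ∉ ks := by
          intro hmem
          apply hk
          rw [PySem.Set.contains_iff, h1, PySem.Set.mem_ofList]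
          exact hmem
        have hk0 : ks.count k = 0 := List.count_eq_zero.2 hkks
        rw [if_neg hk, h3, List.count_append]
        rcases eq_or_ne x k with rfl | hx
        · simp only [List.count_singleton, beq_self_eq_true, if_true]
          omega
        · rw [List.count_singleton, if_neg (by simpa using fun h => hx h.symm), Nat.add_zero]

-- on a sorted tail whose elements all dominate x, skipping the run of x is filtering x out
lemma pvSkipRun_eq_filter (x : String) (xs : List String)
    (h : xs.Pairwise (· ≤ ·)) (hall : ∀ y ∈ xs, x ≤ y) :
    pvSkipRun x xs = xs.filter (fun y => y ≠ x) := by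
  induction xs with
  | nil => rfl
  | cons y ys ih =>
    rcases List.pairwise_cons.1 h with ⟨hy, hys⟩
    by_cases hyx : y = x
    · subst hyx
      simp only [pvSkipRun, List.filter_cons]
      rw [ih hys (fun z hz => hall z (List.mem_cons_of_mem _ hz))]
      simp
    · have hxy : x < y :=
        lt_of_le_of_ne (hall y (List.mem_cons_self)) (Ne.symm hyx)
      have hne : ∀ z ∈ ys, z ≠ x := by
        intro z hz h'
        subst h'
        exact absurd (hy z hz) (not_le.2 hxy)
      simp only [pvSkipRun, if_neg hyx, List.filter_cons]
      rw [List.filter_eq_self.2 (by intro z hz; simpa using hne z hz)]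
      simp [hyx]

-- on a sorted list, the run-scan counts the distinct keys of multiplicity exactly 1
lemma pvCountRuns_sorted (s : List String) (h : s.Pairwise (· ≤ ·)) :
    pvCountRuns s = ((s.dedup.filter (fun z => s.count z = 1)).length : Int) := by
  induction s using pvCountRuns.induct with
  | case1 => simp [pvCountRuns]
  | case2 x xs hh ih =>
    rcases List.pairwise_cons.1 h with ⟨hall, hxs⟩
    obtain ⟨t, rfl⟩ : ∃ t, xs = x :: t := by
      cases xs with
      | nil => simp at hh
      | cons y t =>
        simp only [List.head?_cons, Option.some.injEq] at hh
        exact ⟨t, by rw [hh]⟩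
    set r := (x :: t).filter (fun y => y ≠ x) with hr
    have hskip : pvSkipRun x (x :: t) = r :=
      pvSkipRun_eq_filter x (x :: t) hxs hall
    have hr_pair : r.Pairwise (· ≤ ·) := hxs.sublist List.filter_sublist
    have hx_r : x ∉ r := by simp [hr, List.mem_filter]
    have hL : pvCountRuns (x :: x :: t) = pvCountRuns r := by
      rw [pvCountRuns]
      simp [hskip]
    have ih' := ih (by rw [hskip]; exact hr_pair)
    rw [hskip] at ih'
    rw [hL, ih']
    congr 1
    -- the two filtered distinct-key lists are permutations of each other
    have hperm : ((x :: x :: t).dedup.filter (fun z => (x :: x :: t).count z = 1)).Perm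
        (r.dedup.filter (fun z => r.count z = 1)) := by
      apply (List.perm_ext_iff_of_nodup ((List.nodup_dedup _).filter _)
        ((List.nodup_dedup _).filter _)).2
      intro z
      simp only [List.mem_filter, List.mem_dedup, decide_eq_true_eq]
      rcases eq_or_ne z x with rfl | hz
      · constructor
        · rintro ⟨-, hc⟩
          simp [List.count_cons_self] at hc
        · rintro ⟨hc, -⟩
          exact absurd ((List.mem_dedup.1 (List.mem_dedup.2 hc) : z ∈ r)) hx_r
      · have hcr : r.count z = (x :: t).count z :=
          List.count_filter (by simpa using hz)
        have hmem : z ∈ r ↔ z ∈ t := by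
          simp [hr, List.mem_filter, hz]
        have hc2 : (x :: x :: t).count z = t.count z := by
          simp [(Ne.symm hz : x ≠ z)]
        have hc3 : (x :: t).count z = t.count z := by
          simp [(Ne.symm hz : x ≠ z)]
        rw [hcr, hc3, hc2]
        simp only [List.mem_cons, hz, false_or]
        tauto
    rw [hperm.length_eq]
  | case3 x xs hh ih =>
    rcases List.pairwise_cons.1 h with ⟨hall, hxs⟩
    have hxnot : x ∉ xs := by
      intro hmem
      cases xs with
      | nil => simp at hmem
      | cons y t =>
        rcases List.pairwise_cons.1 hxs with ⟨hy, -⟩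
        rcases List.mem_cons.1 hmem with rfl | hxt
        · exact hh (by simp)
        · have h1 : y ≤ x := hy x hxt
          have h2 : y = x := le_antisymm h1 (hall y List.mem_cons_self)
          exact hh (by simp [h2])
    have hL : pvCountRuns (x :: xs) = 1 + pvCountRuns xs := by
      rw [pvCountRuns, if_neg hh]
    have hcx : (x :: xs).count x = 1 := by
      rw [List.count_cons_self, List.count_eq_zero.2 hxnot]
    have hded : (x :: xs).dedup = x :: xs.dedup := List.dedup_cons_of_notMem hxnot
    have hcongr : xs.dedup.filter (fun z => (x :: xs).count z = 1)
        = xs.dedup.filter (fun z => xs.count z = 1) := by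
      apply List.filter_congr
      intro z hz
      have hzx : z ≠ x := fun h' => hxnot (h' ▸ List.mem_dedup.1 hz)
      simp [(Ne.symm hzx : x ≠ z)]
    rw [hL, hded, List.filter_cons, ih hxs]
    simp only [hcx, decide_true, if_true, List.length_cons, hcongr]
    push_cast
    ring

theorem countUniqueAnagrams_spec : Claim_equal_countUniqueAnagrams := by
  intro words _
  unfold Spec_countUniqueAnagrams countUniqueAnagrams countUniqueAnagrams_alt
  simp only
  set ks := words.map (fun w => String.ofList (PySem.List.sorted w.toList (fun c => c) false)) with hks
  have hfoldA :
      words.foldl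
        (fun (p : PySem.Set String × PySem.Set String) word =>
          (PySem.Set.add p.1 (String.ofList (PySem.List.sorted word.toList (fun c => c) false)),
            if PySem.Set.contains p.1 (String.ofList (PySem.List.sorted word.toList (fun c => c) false))
            then PySem.Set.add p.2 (String.ofList (PySem.List.sorted word.toList (fun c => c) false)) else p.2))
        (PySem.Set.empty, PySem.Set.empty)
      = ks.foldl pvStepA (PySem.Set.empty, PySem.Set.empty) := by
    rw [hks, List.foldl_map]; rfl
  rw [hfoldA]
  obtain ⟨h1, h2, h3⟩ := pvA_state ks
  rw [h1]
  -- B's side: the sorted key list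
  set s := PySem.List.sorted ks (fun k => k) false with hs
  have hpair : s.Pairwise (· ≤ ·) := by
    have := PySem.List.sorted_pairwise (xs := ks) (key := fun k => k)
    simpa using this
  have hsperm : s.Perm ks := PySem.List.sorted_perm ks (fun k => k) false
  rw [pvCountRuns_sorted s hpair]
  -- A's nonUnique set is a permutation of the ≥2-count distinct keys
  set L := PySem.Set.ofList ks with hLdef
  have hperm2 : (ks.foldl pvStepA (PySem.Set.empty, PySem.Set.empty)).2.Perm
      (L.filter (fun x => decide (2 ≤ ks.count x))) := by
    apply (List.perm_ext_iff_of_nodup h2 (List.Nodup.filter _ (PySem.Set.nodup_ofList _))).2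
    intro z
    rw [h3, List.mem_filter, PySem.Set.mem_ofList]
    simp only [decide_eq_true_eq]
    constructor
    · intro hz
      exact ⟨List.count_pos_iff.1 (by omega), hz⟩
    · exact fun ⟨_, hz⟩ => hz
  -- B's filtered dedup is a permutation of the 1-count distinct keys
  have hperm1 : (s.dedup.filter (fun z => s.count z = 1)).Perm
      (L.filter (fun z => decide (ks.count z = 1))) := by
    apply (List.perm_ext_iff_of_nodup ((List.nodup_dedup _).filter _)
      (List.Nodup.filter _ (PySem.Set.nodup_ofList _))).2
    intro z
    simp only [List.mem_filter, List.mem_dedup, PySem.Set.mem_ofList, decide_eq_true_eq,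
      hsperm.mem_iff, hsperm.count_eq]
  rw [PySem.Set.len, PySem.Set.len, hperm2.length_eq, hperm1.length_eq]
  -- final counting argument over the distinct keys
  have hmem : ∀ z ∈ L, 1 ≤ ks.count z := fun z hz =>
    List.count_pos_iff.2 ((PySem.Set.mem_ofList _ _).1 hz)
  have hcongr : L.filter (fun z => decide (ks.count z = 1))
      = L.filter (fun z => !decide (2 ≤ ks.count z)) := by
    apply List.filter_congr
    intro z hz
    have := hmem z hz
    rw [Bool.eq_iff_iff]
    simp only [decide_eq_true_eq, Bool.not_eq_true', decide_eq_false_iff_not]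
    omega
  rw [hcongr]
  have hsplit : L.length = (L.filter (fun z => decide (2 ≤ ks.count z))).length
      + (L.filter (fun z => !decide (2 ≤ ks.count z))).length := by
    rw [← List.countP_eq_length_filter, ← List.countP_eq_length_filter]
    have h := List.length_eq_countP_add_countP (p := fun z => decide (2 ≤ ks.count z)) (l := L)
    simp only [decide_eq_true_eq] at h
    simp only [← decide_not]
    exact h
  omega
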